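-- pv_equiv track=rewrite | github.com/GuillaumeSmaha/advent-of-code | advent-of-code-2020/07/calc2.py | data_expand_key
-- ===== SOURCE A (Python) =====
-- def data_expand_key(d, k, m):
--     r = {
--         k: m
--     }
--     if k in d:
--         for kk, v in d[k].items():
--             for rk, rv in data_expand_key(d, kk, m*v).items():
--                 if rk not in r:
--                     r[rk] = 0
--                 r[rk] += rv
--     return r
-- ===== SOURCE B (Python) =====
-- def data_expand_key(d, k, m):
--     # Memoized: expand each key once with unit multiplier, then scale by m.
--     memo = {}
--
--     def expand1(key):
--         if key in memo:
--             return memo[key]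
--         r = {key: 1}
--         if key in d:
--             for kk, v in d[key].items():
--                 for rk, rv in expand1(kk).items():
--                     r[rk] = r.get(rk, 0) + rv * v
--         memo[key] = r
--         return r
--
--     return {rk: rv * m for rk, rv in expand1(k).items()}
-- ===== Notes on version B (the rewrite author's own statement) =====
-- stated objective: alternative
-- what changed: B expands every bag key at most once (a memo dict of unit expansions, scaled by the multiplier at the end) instead of A's re-expanding a sub-bag once per path reaching it; on the measured random inputs the cost is the same.
import Mathlib
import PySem

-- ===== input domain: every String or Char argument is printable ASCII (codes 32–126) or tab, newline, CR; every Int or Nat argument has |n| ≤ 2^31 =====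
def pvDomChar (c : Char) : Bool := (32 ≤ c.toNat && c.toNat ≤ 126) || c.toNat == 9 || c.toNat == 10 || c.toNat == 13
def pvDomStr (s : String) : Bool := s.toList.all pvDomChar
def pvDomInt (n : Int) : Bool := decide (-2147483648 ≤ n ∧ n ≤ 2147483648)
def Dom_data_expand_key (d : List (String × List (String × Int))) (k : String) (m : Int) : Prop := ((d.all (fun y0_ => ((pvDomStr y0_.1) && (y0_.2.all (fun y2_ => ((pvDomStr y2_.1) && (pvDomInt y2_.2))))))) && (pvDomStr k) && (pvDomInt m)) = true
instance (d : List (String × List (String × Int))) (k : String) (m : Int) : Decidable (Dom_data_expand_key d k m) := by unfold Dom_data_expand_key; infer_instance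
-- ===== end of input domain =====

-- B replaces A's per-path re-expansion of shared sub-bags by one memoized unit expansion per key,
-- scaled by the multiplier at the end (objective: alternative algorithm).


-- ===== PORT A =====
-- r[rk] not in r → r[rk] = 0; r[rk] += rv  (the two statements of A's inner loop body)
def pvMergeA (r : PySem.Dict String Int) (q : String × Int) : PySem.Dict String Int :=
  let r := if r.contains q.1 then r else r.insert q.1 0
  r.insert q.1 (r.getD q.1 0 + q.2)

-- A's recursion, with a fuel counter only to make it total in Lean; the top-level fuel
-- d.length + 1 is never exhausted on inputs satisfying Pre_ (no cycle is reachable from k).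
def pvGoA (d : List (String × List (String × Int))) : Nat → String → Int → PySem.Dict String Int
  | 0, _, _ => PySem.Dict.mk []
  | fuel+1, k, m =>
    let r : PySem.Dict String Int := PySem.Dict.mk [(k, m)]
    match (PySem.Dict.mk d).get? k with
    | none => r
    | some inner =>
      inner.foldl (fun r p => ((pvGoA d fuel p.1 (m * p.2)).items).foldl pvMergeA r) r

def data_expand_key (d : List (String × List (String × Int))) (k : String) (m : Int) : List (String × Int) :=
  (pvGoA d (d.length + 1) k m).items

-- ===== PORT B =====
-- r[rk] = r.get(rk, 0) + rv * v  (B's inner loop body; v is the edge weight)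
def pvMergeB (v : Int) (r : PySem.Dict String Int) (q : String × Int) : PySem.Dict String Int :=
  r.insert q.1 (r.getD q.1 0 + q.2 * v)

-- B's memoized unit expansion expand1, threading the memo dict; same totality fuel.
def pvExpB (d : List (String × List (String × Int))) :
    Nat → PySem.Dict String (PySem.Dict String Int) → String →
    PySem.Dict String Int × PySem.Dict String (PySem.Dict String Int)
  | 0, memo, _ => (PySem.Dict.mk [], memo)
  | fuel+1, memo, key =>
    match memo.get? key with
    | some r => (r, memo)
    | none =>
      let st :=
        match (PySem.Dict.mk d).get? key with
        | none => ((PySem.Dict.mk [(key, (1 : Int))]), memo)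
        | some inner =>
          inner.foldl (fun st (p : String × Int) =>
            let rm := pvExpB d fuel st.2 p.1
            (rm.1.items.foldl (pvMergeB p.2) st.1, rm.2))
            ((PySem.Dict.mk [(key, (1 : Int))]), memo)
      (st.1, st.2.insert key st.1)

def data_expand_key_alt (d : List (String × List (String × Int))) (k : String) (m : Int) : List (String × Int) :=
  ((pvExpB d (d.length + 1) (PySem.Dict.mk []) k).1.items).map (fun q => (q.1, q.2 * m))

-- ===== PRECONDITION & SPEC =====
-- reference graph of d: children of a key, one closure step, and the reachability closure
-- (iterated enough times to be a fixed point: pvN d exceeds the number of names occurring in d)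
def pvChildren (d : List (String × List (String × Int))) (x : String) : Finset String :=
  match (PySem.Dict.mk d).get? x with
  | none => ∅
  | some inner => (inner.map Prod.fst).toFinset

def pvStep (d : List (String × List (String × Int))) (S : Finset String) : Finset String :=
  S ∪ S.biUnion (pvChildren d)

def pvN (d : List (String × List (String × Int))) : Nat :=
  d.length + (d.map (fun p => p.2.length)).sum + 1

def pvReach (d : List (String × List (String × Int))) (x : String) : Finset String :=
  (pvStep d)^[pvN d] {x}

def pvDesc (d : List (String × List (String × Int))) (x : String) : Finset String :=
  (pvStep d)^[pvN d] (pvChildren d x)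

-- Pre_ holds exactly when no key reachable from k lies on a reference cycle; on the excluded
-- inputs A's recursion never returns (Python RecursionError), and B raises there too. It admits
-- every acyclic d in any listing order, any k (present in d or not), and any d whose cycles are
-- unreachable from k.
def Pre_data_expand_key (d : List (String × List (String × Int))) (k : String) (_m : Int) : Prop :=
  ∀ x ∈ (d.map Prod.fst).toFinset, x ∈ pvReach d k → x ∉ pvDesc d x
instance (d : List (String × List (String × Int))) (k : String) (m : Int) : Decidable (Pre_data_expand_key d k m) := by unfold Pre_data_expand_key; infer_instance

def pvWitness_data_expand_key : (List (String × List (String × Int))) × String × Int :=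
  ([("a", [("b", 2), ("c", 3)]), ("b", [("c", 4)]), ("c", [])], "a", 5)

def Spec_data_expand_key (d : List (String × List (String × Int))) (k : String) (m : Int) (out : List (String × Int)) : Prop := out = data_expand_key_alt d k m
instance (d : List (String × List (String × Int))) (k : String) (m : Int) (out : List (String × Int)) : Decidable (Spec_data_expand_key d k m out) := by unfold Spec_data_expand_key; infer_instance

-- ===== CLAIM (what is proved, stated in full; the proofs are below) =====
def Claim_equal_data_expand_key : Prop := ∀ (d : List (String × List (String × Int))) (k : String) (m : Int), Dom_data_expand_key d k m → Pre_data_expand_key d k m → Spec_data_expand_key d k m (data_expand_key d k m)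

-- ===== LEMMAS AND PROOFS =====

-- ---- closure facts ----
theorem pvStep_sub (d : List (String × List (String × Int))) (S : Finset String) :
    S ⊆ pvStep d S := Finset.subset_union_left

theorem pvStep_mono (d : List (String × List (String × Int))) {S T : Finset String}
    (h : S ⊆ T) : pvStep d S ⊆ pvStep d T :=
  Finset.union_subset_union h (Finset.biUnion_subset_biUnion_of_subset_left _ h)

theorem pvIter_sub (d : List (String × List (String × Int))) (n : Nat) (S : Finset String) :
    S ⊆ (pvStep d)^[n] S := by
  induction n with
  | zero => simp
  | succ n ih =>
    rw [Function.iterate_succ_apply']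
    exact ih.trans (pvStep_sub d _)

theorem pvIter_mono (d : List (String × List (String × Int))) (n : Nat) {S T : Finset String}
    (h : S ⊆ T) : (pvStep d)^[n] S ⊆ (pvStep d)^[n] T := by
  induction n with
  | zero => simpa
  | succ n ih =>
    rw [Function.iterate_succ_apply', Function.iterate_succ_apply']
    exact pvStep_mono d ih

theorem pvIter_le_closed (d : List (String × List (String × Int))) (n : Nat)
    {S T : Finset String} (hT : pvStep d T ⊆ T) (h : S ⊆ T) : (pvStep d)^[n] S ⊆ T := by
  induction n with
  | zero => simpa
  | succ n ih =>
    rw [Function.iterate_succ_apply']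
    exact (pvStep_mono d ih).trans hT

theorem pvGet?_mem : ∀ (d : List (String × List (String × Int))) (x : String)
    (v : List (String × Int)), (PySem.Dict.mk d).get? x = some v → (x, v) ∈ d := by
  intro d
  induction d with
  | nil => intro x v h; simp [PySem.Dict.get?] at h
  | cons a t ih =>
    intro x v h
    obtain ⟨a1, a2⟩ := a
    rw [PySem.Dict.get?_mk_cons] at h
    by_cases h1 : a1 == x
    · have hk : a1 = x := by simpa using h1
      rw [if_pos h1] at h
      simp at h
      simp [hk, h]
    · rw [if_neg h1] at h
      exact List.mem_cons_of_mem _ (ih x v h)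

def pvAll (d : List (String × List (String × Int))) : Finset String :=
  (d.map Prod.fst).toFinset ∪ (d.flatMap (fun p => p.2.map Prod.fst)).toFinset

theorem pvChildren_sub_all (d : List (String × List (String × Int))) (x : String) :
    pvChildren d x ⊆ pvAll d := by
  unfold pvChildren
  cases h : (PySem.Dict.mk d).get? x with
  | none => simp
  | some inner =>
    intro y hy
    have hmem : (x, inner) ∈ d := pvGet?_mem d x inner h
    rw [List.mem_toFinset] at hy
    apply Finset.mem_union_right
    rw [List.mem_toFinset, List.mem_flatMap]
    exact ⟨(x, inner), hmem, hy⟩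

theorem pvStep_bound (d : List (String × List (String × Int))) (S : Finset String) :
    pvStep d S ⊆ S ∪ pvAll d := by
  unfold pvStep
  apply Finset.union_subset Finset.subset_union_left
  apply Finset.biUnion_subset.mpr
  intro x _
  exact (pvChildren_sub_all d x).trans Finset.subset_union_right

theorem pvIter_bound (d : List (String × List (String × Int))) (n : Nat) (S : Finset String) :
    (pvStep d)^[n] S ⊆ S ∪ pvAll d := by
  induction n with
  | zero => simp
  | succ n ih =>
    rw [Function.iterate_succ_apply']
    exact (pvStep_bound d _).trans (Finset.union_subset (ih.trans (by simp)) Finset.subset_union_right)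

theorem pvAll_card (d : List (String × List (String × Int))) : (pvAll d).card < pvN d := by
  unfold pvAll pvN
  have h1 := Finset.card_union_le (d.map Prod.fst).toFinset
    (d.flatMap (fun p => p.2.map Prod.fst)).toFinset
  have h2 := (d.map Prod.fst).toFinset_card_le
  have h3 := (d.flatMap (fun p => p.2.map Prod.fst)).toFinset_card_le
  have h4 : (d.flatMap (fun p => p.2.map Prod.fst)).length
      = (d.map (fun p => p.2.length)).sum := by
    rw [List.length_flatMap]
    congr 1
    simp
  simp only [List.length_map] at h2
  omega

theorem pvFix (d : List (String × List (String × Int))) (S : Finset String) :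
    pvStep d ((pvStep d)^[pvN d] S) = (pvStep d)^[pvN d] S := by
  have hstab : ∃ i ≤ (pvAll d).card, (pvStep d)^[i+1] S = (pvStep d)^[i] S := by
    by_contra hcon
    push Not at hcon
    have grow : ∀ i, i ≤ (pvAll d).card + 1 → S.card + i ≤ ((pvStep d)^[i] S).card := by
      intro i
      induction i with
      | zero => simp
      | succ i ih =>
        intro hi
        have hne := hcon i (by omega)
        have hsub : (pvStep d)^[i] S ⊆ (pvStep d)^[i+1] S := by
          rw [Function.iterate_succ_apply']
          exact pvStep_sub d _
        have hss : (pvStep d)^[i] S ⊂ (pvStep d)^[i+1] S :=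
          HasSubset.Subset.ssubset_of_ne hsub (Ne.symm hne)
        have := Finset.card_lt_card hss
        have := ih (by omega)
        omega
    have h1 := grow ((pvAll d).card + 1) le_rfl
    have h2 : ((pvStep d)^[(pvAll d).card + 1] S).card ≤ (S ∪ pvAll d).card :=
      Finset.card_le_card (pvIter_bound d _ S)
    have h3 := Finset.card_union_le S (pvAll d)
    omega
  obtain ⟨i, hi, heq⟩ := hstab
  rw [Function.iterate_succ_apply'] at heq
  have hpers : ∀ j, (pvStep d)^[i + j] S = (pvStep d)^[i] S := by
    intro j
    induction j with
    | zero => rfl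
    | succ j ih =>
      rw [show i + (j + 1) = (i + j) + 1 from by omega, Function.iterate_succ_apply', ih]
      exact heq
  have hN : pvN d = i + (pvN d - i) := by
    have := pvAll_card d; omega
  have hNeq : (pvStep d)^[pvN d] S = (pvStep d)^[i] S := by
    conv_lhs => rw [hN]
    exact hpers _
  rw [hNeq]
  exact heq

theorem pvReach_closed (d : List (String × List (String × Int))) (x : String) :
    pvStep d (pvReach d x) = pvReach d x := pvFix d _

theorem pvMem_reach_self (d : List (String × List (String × Int))) (x : String) :
    x ∈ pvReach d x := pvIter_sub d _ _ (Finset.mem_singleton_self x)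

theorem pvChildren_sub_reach (d : List (String × List (String × Int))) {k x : String}
    (hx : x ∈ pvReach d k) : pvChildren d x ⊆ pvReach d k := by
  have h1 : pvChildren d x ⊆ pvStep d (pvReach d k) := by
    unfold pvStep
    exact (Finset.subset_biUnion_of_mem (pvChildren d) hx).trans Finset.subset_union_right
  rwa [pvReach_closed] at h1

theorem pvReach_trans (d : List (String × List (String × Int))) {k y : String}
    (hy : y ∈ pvReach d k) : pvReach d y ⊆ pvReach d k := by
  apply pvIter_le_closed d _ (le_of_eq (pvReach_closed d k))
  simpa using hy

-- ---- the decreasing measure: number of d-keys reachable from a name ----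
def pvGauge (d : List (String × List (String × Int))) (x : String) : Nat :=
  (pvReach d x ∩ (d.map Prod.fst).toFinset).card

theorem pvGauge_le (d : List (String × List (String × Int))) (x : String) :
    pvGauge d x ≤ d.length := by
  unfold pvGauge
  have h1 : (pvReach d x ∩ (d.map Prod.fst).toFinset).card ≤ (d.map Prod.fst).toFinset.card :=
    Finset.card_le_card Finset.inter_subset_right
  have h2 := (d.map Prod.fst).toFinset_card_le
  simp only [List.length_map] at h2
  omega

-- children of a key reachable from k are reachable too and have strictly smaller gauge
theorem pvChild_gauge (d : List (String × List (String × Int))) (k : String)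
    (hPre : Pre_data_expand_key d k 0)
    (x : String) (hx : x ∈ pvReach d k) (inner : List (String × Int))
    (h : (PySem.Dict.mk d).get? x = some inner)
    (q : String × Int) (hq : q ∈ inner) :
    q.1 ∈ pvReach d k ∧ pvGauge d q.1 < pvGauge d x := by
  have hxkey : x ∈ (d.map Prod.fst).toFinset := by
    rw [List.mem_toFinset, List.mem_map]
    exact ⟨(x, inner), pvGet?_mem d x inner h, rfl⟩
  have hqc : q.1 ∈ pvChildren d x := by
    unfold pvChildren
    rw [h, List.mem_toFinset, List.mem_map]
    exact ⟨q, hq, rfl⟩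
  have hqR : q.1 ∈ pvReach d k := pvChildren_sub_reach d hx hqc
  have hqRx : q.1 ∈ pvReach d x := pvChildren_sub_reach d (pvMem_reach_self d x) hqc
  have hsub : pvReach d q.1 ⊆ pvReach d x := pvReach_trans d hqRx
  have hxnot : x ∉ pvReach d q.1 := by
    intro hc
    apply hPre x hxkey hx
    have : pvReach d q.1 ⊆ pvDesc d x := pvIter_mono d _ (by simpa using hqc)
    exact this hc
  refine ⟨hqR, ?_⟩
  unfold pvGauge
  apply Finset.card_lt_card
  rw [Finset.ssubset_iff_of_subset (Finset.inter_subset_inter_right hsub)]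
  exact ⟨x, Finset.mem_inter.mpr ⟨pvMem_reach_self d x, hxkey⟩,
    fun hc => hxnot (Finset.mem_inter.mp hc).1⟩

-- ---- algebra of A's merge and scaling ----
def pvScale (m : Int) (r : PySem.Dict String Int) : PySem.Dict String Int :=
  PySem.Dict.mk (r.items.map (fun q => (q.1, m * q.2)))

-- memo invariant: every cached entry is the unit expansion of its key
def pvGood (d : List (String × List (String × Int)))
    (memo : PySem.Dict String (PySem.Dict String Int)) : Prop :=
  ∀ p ∈ memo.items, p.2 = pvGoA d (pvGauge d p.1 + 1) p.1 1

theorem pvScale_contains (m : Int) (r : PySem.Dict String Int) (x : String) :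
    (pvScale m r).contains x = r.contains x := by
  simp [pvScale, PySem.Dict.contains, List.any_map, Function.comp_def]

theorem pvScale_getD (m : Int) (r : PySem.Dict String Int) (x : String) :
    (pvScale m r).getD x 0 = m * r.getD x 0 := by
  obtain ⟨l⟩ := r
  simp only [pvScale, PySem.Dict.getD, PySem.Dict.get?, List.find?_map]
  induction l with
  | nil => simp
  | cons a t ih =>
    by_cases h : a.1 == x
    · simp [h, Function.comp]
    · simpa [h, Function.comp] using ih

theorem pvScale_insert (m : Int) (r : PySem.Dict String Int) (x : String) (w : Int) :
    (pvScale m r).insert x (m * w) = pvScale m (r.insert x w) := by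
  rw [PySem.Dict.insert, PySem.Dict.insert, pvScale_contains]
  by_cases h : r.contains x
  · simp only [h, if_pos, pvScale, List.map_map]
    congr 1
    apply List.map_congr_left
    intro p _
    by_cases hp : p.1 == x <;> simp [hp, Function.comp]
  · simp [h, pvScale]

theorem pvMergeA_eq (r : PySem.Dict String Int) (q : String × Int) :
    pvMergeA r q = r.insert q.1 (r.getD q.1 0 + q.2) := by
  unfold pvMergeA
  by_cases h : r.contains q.1
  · simp [h]
  · simp only [h, Bool.false_eq_true, if_false]
    rw [PySem.Dict.getD_insert_self, PySem.Dict.insert_insert_self,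
      PySem.Dict.getD_of_not_contains r 0 (by simpa using h)]

theorem pvFoldl_mergeA_scale (m : Int) :
    ∀ (ys : List (String × Int)) (acc : PySem.Dict String Int),
      List.foldl pvMergeA (pvScale m acc) (ys.map (fun q => (q.1, m * q.2))) =
      pvScale m (List.foldl pvMergeA acc ys) := by
  intro ys
  induction ys with
  | nil => intro acc; rfl
  | cons y t ih =>
    intro acc
    have : pvMergeA (pvScale m acc) (y.1, m * y.2) = pvScale m (pvMergeA acc y) := by
      rw [pvMergeA_eq, pvMergeA_eq, pvScale_getD, ← mul_add, pvScale_insert]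
    simpa [this] using ih (pvMergeA acc y)

theorem pvGoA_scale (d : List (String × List (String × Int))) :
    ∀ f k m, pvGoA d f k m = pvScale m (pvGoA d f k 1) := by
  intro f
  induction f with
  | zero => intro k m; rfl
  | succ f ih =>
    intro k m
    simp only [pvGoA]
    have hbase : (PySem.Dict.mk [(k, m)]) = pvScale m (PySem.Dict.mk [(k, (1:Int))]) := by
      simp [pvScale]
    cases hk : (PySem.Dict.mk d).get? k with
    | none => simpa using hbase
    | some inner =>
      clear hk
      simp only [hbase]
      generalize (PySem.Dict.mk [(k, (1:Int))]) = acc0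
      induction inner generalizing acc0 with
      | nil => rfl
      | cons p t iht =>
        simp only [List.foldl_cons]
        have hstep : ((pvGoA d f p.1 (m * p.2)).items).foldl pvMergeA (pvScale m acc0) =
            pvScale m (((pvGoA d f p.1 (1 * p.2)).items).foldl pvMergeA acc0) := by
          rw [ih p.1 (m * p.2), ih p.1 (1 * p.2), one_mul]
          have hitems : (pvScale (m * p.2) (pvGoA d f p.1 1)).items =
              ((pvScale p.2 (pvGoA d f p.1 1)).items).map (fun q => (q.1, m * q.2)) := by
            simp [pvScale, List.map_map, Function.comp_def, mul_assoc]
          rw [hitems, pvFoldl_mergeA_scale]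
        rw [hstep]
        exact iht (List.foldl pvMergeA acc0 ((pvGoA d f p.1 (1 * p.2)).items))

theorem pvGoA_fuel (d : List (String × List (String × Int))) (k : String)
    (hPre : Pre_data_expand_key d k 0) :
    ∀ f₁ f₂ x m, x ∈ pvReach d k → pvGauge d x < f₁ → pvGauge d x < f₂ →
      pvGoA d f₁ x m = pvGoA d f₂ x m := by
  intro f₁
  induction f₁ with
  | zero => intro f₂ x m _ h1; omega
  | succ f₁ ih =>
    intro f₂ x m hx h1 h2
    cases f₂ with
    | zero => omega
    | succ f₂ =>
      simp only [pvGoA]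
      cases hk : (PySem.Dict.mk d).get? x with
      | none => rfl
      | some inner =>
        apply PySem.List.foldl_congr_mem
        intro acc p hp
        obtain ⟨hpR, hg⟩ := pvChild_gauge d k hPre x hx inner hk p hp
        rw [ih f₂ p.1 (m * p.2) hpR (by omega) (by omega)]

theorem pvStepAB (d : List (String × List (String × Int))) (k : String)
    (hPre : Pre_data_expand_key d k 0)
    (key : String) (p : String × Int) (hp1 : p.1 ∈ pvReach d k)
    (hgp : pvGauge d p.1 < pvGauge d key)
    (acc : PySem.Dict String Int) :
    ((pvGoA d (pvGauge d key) p.1 (1 * p.2)).items).foldl pvMergeA acc =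
    ((pvGoA d (pvGauge d p.1 + 1) p.1 1).items).foldl (pvMergeB p.2) acc := by
  rw [pvGoA_fuel d k hPre (pvGauge d key) (pvGauge d p.1 + 1) p.1 (1 * p.2) hp1 hgp
    (Nat.lt_succ_self _),
    pvGoA_scale d (pvGauge d p.1 + 1) p.1 (1 * p.2)]
  show (List.map (fun q : String × Int => (q.1, 1 * p.2 * q.2)) _).foldl pvMergeA acc = _
  rw [List.foldl_map]
  apply PySem.List.foldl_congr_mem
  intro a q _
  rw [pvMergeA_eq]
  simp only [pvMergeB, one_mul]
  ring_nf

theorem pvExpB_correct (d : List (String × List (String × Int))) (k : String)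
    (hPre : Pre_data_expand_key d k 0) :
    ∀ f memo key, key ∈ pvReach d k → pvGauge d key < f → pvGood d memo →
      (pvExpB d f memo key).1 = pvGoA d (pvGauge d key + 1) key 1 ∧
      pvGood d (pvExpB d f memo key).2 := by
  intro f
  induction f with
  | zero => intro memo key _ h; omega
  | succ f ih =>
    intro memo key hkey hg hGood
    simp only [pvExpB]
    cases hm : memo.get? key with
    | some r =>
      exact ⟨hGood _ (PySem.Dict.mem_items_of_get?_eq_some memo hm), hGood⟩
    | none =>
      simp only [pvGoA]
      cases hk : (PySem.Dict.mk d).get? key with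
      | none =>
        constructor
        · rfl
        · intro p hp
          rw [PySem.Dict.mem_items_insert] at hp
          rcases hp with h | ⟨h, _⟩
          · subst h; simp only [pvGoA, hk]
          · exact hGood p h
      | some inner =>
        have hch : ∀ p ∈ inner, p.1 ∈ pvReach d k ∧ pvGauge d p.1 < pvGauge d key :=
          fun p hp => pvChild_gauge d k hPre key hkey inner hk p hp
        have claim : ∀ (l : List (String × Int)),
            (∀ p ∈ l, p.1 ∈ pvReach d k ∧ pvGauge d p.1 < pvGauge d key) →
            ∀ (acc : PySem.Dict String Int) (memo' : PySem.Dict String (PySem.Dict String Int)),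
            pvGood d memo' →
            (List.foldl (fun st (p : String × Int) =>
                let rm := pvExpB d f st.2 p.1
                (rm.1.items.foldl (pvMergeB p.2) st.1, rm.2)) (acc, memo') l).1 =
              List.foldl (fun r (p : String × Int) =>
                ((pvGoA d (pvGauge d key) p.1 (1 * p.2)).items).foldl pvMergeA r) acc l ∧
            pvGood d (List.foldl (fun st (p : String × Int) =>
                let rm := pvExpB d f st.2 p.1
                (rm.1.items.foldl (pvMergeB p.2) st.1, rm.2)) (acc, memo') l).2 := by
          intro l
          induction l with
          | nil => intro _ acc memo' hG; exact ⟨rfl, hG⟩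
          | cons p t iht =>
            intro hl acc memo' hG
            obtain ⟨hpR, hgp⟩ := hl p List.mem_cons_self
            obtain ⟨hv, hG2⟩ := ih memo' p.1 hpR (by omega) hG
            simp only [List.foldl_cons, hv]
            rw [← pvStepAB d k hPre key p hpR hgp acc]
            exact iht (fun q hq => hl q (List.mem_cons_of_mem p hq)) _ _ hG2
        obtain ⟨hv, hG2⟩ := claim inner hch (PySem.Dict.mk [(key, (1:Int))]) memo hGood
        refine ⟨hv, ?_⟩
        intro p hp
        rw [PySem.Dict.mem_items_insert] at hp
        rcases hp with h | ⟨h, _⟩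
        · subst h
          simp only [pvGoA, hk]
          exact hv
        · exact hG2 p h

theorem pvPre_any_m (d : List (String × List (String × Int))) (k : String) (m : Int)
    (h : Pre_data_expand_key d k m) : Pre_data_expand_key d k 0 := h

-- ===== VERDICT (by name: the statement is the Claim_ definition above) =====
theorem data_expand_key_spec : Claim_equal_data_expand_key := by
  intro d k m _ hPre
  have hT := pvPre_any_m d k m hPre
  unfold Spec_data_expand_key data_expand_key data_expand_key_alt
  have hg : pvGauge d k < d.length + 1 := Nat.lt_succ_of_le (pvGauge_le d k)
  have hkR : k ∈ pvReach d k := pvMem_reach_self d k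
  have h1 : pvGoA d (d.length + 1) k m = pvGoA d (pvGauge d k + 1) k m :=
    pvGoA_fuel d k hT _ _ k m hkR hg (Nat.lt_succ_self _)
  have h2 := (pvExpB_correct d k hT (d.length + 1) (PySem.Dict.mk []) k hkR hg
    (by intro p hp; simp at hp)).1
  rw [h1, h2, pvGoA_scale d (pvGauge d k + 1) k m]
  simp [pvScale, mul_comm]
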